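-- pv_equiv track=rewrite | github.com/conceptixx/AEON | library/runtime/python/environment_layer.py | quote_value
-- ===== SOURCE A (Python) =====
-- def quote_value(value: str) -> str:
--     """
--     Quote a value for safe dotenv storage with proper escaping.
--
--     v0.3.1: Hardened quoting with escape sequences for special characters.
--
--     Escapes: backslash, double-quote, newline, carriage return, tab
--     Quotes: when value contains special chars
--     """
--     # Escape special characters
--     escaped = value.replace('\\', '\\\\')  # Backslash FIRST
--     escaped = escaped.replace('"', '\\"')   # Double quote
--     escaped = escaped.replace('\n', '\\n')  # Newline
--     escaped = escaped.replace('\r', '\\r')  # Carriage return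
--     escaped = escaped.replace('\t', '\\t')  # Tab
--
--     # Quote if value contains spaces, #, or special chars
--     if any(char in value for char in [' ', '#', '"', "'", '\n', '\r', '\t']):
--         return f'"{escaped}"'
--
--     # Quote if starts/ends with whitespace
--     if value != value.strip():
--         return f'"{escaped}"'
--
--     return escaped
-- ===== SOURCE B (Python) =====
-- def quote_value(value: str) -> str:
--     ESC = {'\\': '\\\\', '"': '\\"', '\n': '\\n', '\r': '\\r', '\t': '\\t'}
--     SPECIAL = {' ', '#', '"', "'", '\n', '\r', '\t'}
--     parts = []
--     need_quote = False
--     for ch in value: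
--         parts.append(ESC.get(ch, ch))
--         if ch in SPECIAL:
--             need_quote = True
--     escaped = ''.join(parts)
--     if value != value.strip():
--         need_quote = True
--     return f'"{escaped}"' if need_quote else escaped
-- ===== Notes on version B (the rewrite author's own statement) =====
-- stated objective: alternative
-- what changed: Replaced the five full-string replace passes plus a seven-substring containment scan with a single character-wise loop that builds the escaped pieces from a dict and sets need_quote in the same pass, keeping the value != value.strip() guard verbatim.
import Mathlib
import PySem

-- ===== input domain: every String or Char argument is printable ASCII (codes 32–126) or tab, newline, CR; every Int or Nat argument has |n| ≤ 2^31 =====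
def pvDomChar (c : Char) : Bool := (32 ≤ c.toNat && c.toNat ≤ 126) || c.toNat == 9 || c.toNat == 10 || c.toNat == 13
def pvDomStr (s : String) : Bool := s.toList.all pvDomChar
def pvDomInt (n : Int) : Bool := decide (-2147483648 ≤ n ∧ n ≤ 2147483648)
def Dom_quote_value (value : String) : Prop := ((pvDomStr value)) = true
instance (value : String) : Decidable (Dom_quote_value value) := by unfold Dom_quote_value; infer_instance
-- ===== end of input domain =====

-- B fuses A's five replace passes and its membership scan into one character-wise loop over the string (alternative decomposition; return value unchanged).

-- ===== PORT A =====
def quote_value (value : String) : String :=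
  let e1 := PySem.Str.replace value "\\" "\\\\"
  let e2 := PySem.Str.replace e1 "\"" "\\\""
  let e3 := PySem.Str.replace e2 "\n" "\\n"
  let e4 := PySem.Str.replace e3 "\r" "\\r"
  let e5 := PySem.Str.replace e4 "\t" "\\t"
  if [" ", "#", "\"", "'", "\n", "\r", "\t"].any (fun ch => PySem.Str.isIn ch value) then
    "\"" ++ e5 ++ "\""
  else if value ≠ PySem.Str.strip value then
    "\"" ++ e5 ++ "\""
  else
    e5

-- ===== PORT B =====
-- the ESC dict literal from Source B
def qvEsc : PySem.Dict Char (List Char) :=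
  PySem.Dict.mk [('\\', ['\\', '\\']), ('"', ['\\', '"']), ('\n', ['\\', 'n']),
                 ('\r', ['\\', 'r']), ('\t', ['\\', 't'])]

-- the SPECIAL set literal from Source B
def qvSpecial : PySem.Set Char := PySem.Set.ofList [' ', '#', '"', '\'', '\n', '\r', '\t']

def quote_value_alt (value : String) : String :=
  -- the for-loop: state = (parts, need_quote)
  let st := value.toList.foldl
    (fun (st : List (List Char) × Bool) ch =>
      (st.1 ++ [qvEsc.getD ch [ch]], if qvSpecial.contains ch then true else st.2))
    ([], false)
  let escaped := String.ofList st.1.flatten   -- ''.join(parts)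
  let need_quote := if value ≠ PySem.Str.strip value then true else st.2
  if need_quote then "\"" ++ escaped ++ "\"" else escaped

-- ===== PRECONDITION & SPEC =====
def Spec_quote_value (value : String) (out : String) : Prop := out = quote_value_alt value
instance (value : String) (out : String) : Decidable (Spec_quote_value value out) := by unfold Spec_quote_value; infer_instance

-- ===== CLAIM (what is proved, stated in full; the proofs are below) =====
def Claim_equal_quote_value : Prop := ∀ (value : String), Dom_quote_value value → Spec_quote_value value (quote_value value)

-- ===== LEMMAS AND PROOFS =====

-- replace with a single-character pattern is a per-character flatMap
theorem go_single (o : Char) (new : List Char) :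
    ∀ (l acc : List Char) (fuel : Nat), l.length ≤ fuel →
      PySem.Chars.replace.go [o] new fuel l acc
        = acc.reverse ++ l.flatMap (fun c => if c = o then new else [c]) := by
  intro l
  induction l with
  | nil => intro acc fuel _; cases fuel <;> simp [PySem.Chars.replace.go]
  | cons c t ih =>
    intro acc fuel h
    cases fuel with
    | zero => simp at h
    | succ n =>
      simp only [PySem.Chars.replace.go]
      by_cases hc : c = o
      · subst hc
        simp [List.isPrefixOf, ih (new.reverse ++ acc) n (by simpa using h)]
      · simp [List.isPrefixOf, Ne.symm hc, hc, ih (c :: acc) n (by simpa using h)]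

theorem replace_single (s : List Char) (o : Char) (new : List Char) :
    PySem.Chars.replace s [o] new = s.flatMap (fun c => if c = o then new else [c]) := by
  have := go_single o new s [] s.length (le_refl _)
  simpa [PySem.Chars.replace] using this

-- the composite escape function
def qvE (c : Char) : List Char :=
  if c = '\\' then ['\\', '\\']
  else if c = '"' then ['\\', '"']
  else if c = '\n' then ['\\', 'n']
  else if c = '\r' then ['\\', 'r']
  else if c = '\t' then ['\\', 't']
  else [c]

-- A's escaped string, on the character-list side
theorem chainA (l : List Char) :
    PySem.Chars.replace (PySem.Chars.replace (PySem.Chars.replace (PySem.Chars.replace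
      (PySem.Chars.replace l ['\\'] ['\\', '\\']) ['"'] ['\\', '"'])
      ['\n'] ['\\', 'n']) ['\r'] ['\\', 'r']) ['\t'] ['\\', 't']
      = l.flatMap qvE := by
  simp only [replace_single, List.flatMap_assoc]
  apply List.flatMap_congr
  intro c _
  by_cases h1 : c = '\\'; · subst h1; decide
  by_cases h2 : c = '"';  · subst h2; decide
  by_cases h3 : c = '\n'; · subst h3; decide
  by_cases h4 : c = '\r'; · subst h4; decide
  by_cases h5 : c = '\t'; · subst h5; decide
  simp [qvE, h1, h2, h3, h4, h5]

-- B's dict lookup is qvE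
theorem getD_qvEsc (c : Char) : qvEsc.getD c [c] = qvE c := by
  by_cases h1 : c = '\\'; · subst h1; decide
  by_cases h2 : c = '"';  · subst h2; decide
  by_cases h3 : c = '\n'; · subst h3; decide
  by_cases h4 : c = '\r'; · subst h4; decide
  by_cases h5 : c = '\t'; · subst h5; decide
  have e1 : (('\\' : Char) == c) = false := beq_eq_false_iff_ne.2 (Ne.symm h1)
  have e2 : (('"' : Char) == c) = false := beq_eq_false_iff_ne.2 (Ne.symm h2)
  have e3 : (('\n' : Char) == c) = false := beq_eq_false_iff_ne.2 (Ne.symm h3)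
  have e4 : (('\r' : Char) == c) = false := beq_eq_false_iff_ne.2 (Ne.symm h4)
  have e5 : (('\t' : Char) == c) = false := beq_eq_false_iff_ne.2 (Ne.symm h5)
  simp [qvEsc, qvE, PySem.Dict.getD, PySem.Dict.get?, List.find?, e1, e2, e3, e4, e5, h1, h2, h3, h4, h5]

-- B's loop invariant
theorem foldB (l : List Char) :
    ∀ (acc : List (List Char)) (b : Bool),
      l.foldl (fun (st : List (List Char) × Bool) ch =>
          (st.1 ++ [qvEsc.getD ch [ch]], if qvSpecial.contains ch then true else st.2)) (acc, b)
        = (acc ++ l.map (fun c => qvEsc.getD c [c]),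
           b || l.any (fun c => qvSpecial.contains c)) := by
  induction l with
  | nil => intro acc b; simp
  | cons c t ih =>
    intro acc b
    simp only [List.foldl_cons, ih, List.map_cons, List.any_cons]
    cases hq : qvSpecial.contains c <;> simp

-- single-character infix = membership
theorem singleton_infix (c : Char) (l : List Char) : [c] <:+: l ↔ c ∈ l := by
  constructor
  · intro h; exact (List.singleton_sublist).1 h.sublist
  · intro h
    obtain ⟨s, t, rfl⟩ := List.append_of_mem h
    exact ⟨s, t, by simp⟩

-- A's quoting condition equals B's
theorem cond_eq (value : String) :
    ([" ", "#", "\"", "'", "\n", "\r", "\t"].any (fun ch => PySem.Str.isIn ch value))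
      = value.toList.any (fun c => qvSpecial.contains c) := by
  rcases h : value.toList.any (fun c => qvSpecial.contains c) with _ | _
  · simp only [List.any_eq_false] at h ⊢
    intro ch hch
    simp only [PySem.Str.isIn_eq]
    intro hin
    rw [PySem.Chars.isIn_iff_infix] at hin
    fin_cases hch <;> exact h _ ((singleton_infix _ _).1 hin) (by decide)
  · simp only [List.any_eq_true] at h ⊢
    obtain ⟨c, hc, hs⟩ := h
    rw [PySem.Set.contains_iff] at hs
    simp only [qvSpecial, PySem.Set.mem_ofList] at hs
    fin_cases hs <;>
      first
      | exact ⟨" ", by simp, by rw [PySem.Str.isIn_eq, PySem.Chars.isIn_iff_infix]; exact (singleton_infix _ _).2 hc⟩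
      | exact ⟨"#", by simp, by rw [PySem.Str.isIn_eq, PySem.Chars.isIn_iff_infix]; exact (singleton_infix _ _).2 hc⟩
      | exact ⟨"\"", by simp, by rw [PySem.Str.isIn_eq, PySem.Chars.isIn_iff_infix]; exact (singleton_infix _ _).2 hc⟩
      | exact ⟨"'", by simp, by rw [PySem.Str.isIn_eq, PySem.Chars.isIn_iff_infix]; exact (singleton_infix _ _).2 hc⟩
      | exact ⟨"\n", by simp, by rw [PySem.Str.isIn_eq, PySem.Chars.isIn_iff_infix]; exact (singleton_infix _ _).2 hc⟩
      | exact ⟨"\r", by simp, by rw [PySem.Str.isIn_eq, PySem.Chars.isIn_iff_infix]; exact (singleton_infix _ _).2 hc⟩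
      | exact ⟨"\t", by simp, by rw [PySem.Str.isIn_eq, PySem.Chars.isIn_iff_infix]; exact (singleton_infix _ _).2 hc⟩

-- both programs build the same escaped string
theorem escaped_eq (value : String) :
    PySem.Str.replace (PySem.Str.replace (PySem.Str.replace (PySem.Str.replace
      (PySem.Str.replace value "\\" "\\\\") "\"" "\\\"") "\n" "\\n") "\r" "\\r") "\t" "\\t"
      = String.ofList ((value.toList.map (fun c => qvEsc.getD c [c])).flatten) := by
  have : (value.toList.map (fun c => qvEsc.getD c [c])).flatten = value.toList.flatMap qvE := by
    rw [List.flatMap_def]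
    congr 1
    exact List.map_congr_left (fun c _ => getD_qvEsc c)
  rw [this, ← chainA]
  simp [PySem.Str.replace]

-- ===== VERDICT (by name: the statement is the Claim_ definition above) =====
theorem quote_value_spec : Claim_equal_quote_value := by
  intro value _
  unfold Spec_quote_value quote_value quote_value_alt
  simp only [foldB, List.nil_append, Bool.false_or]
  rw [cond_eq, escaped_eq]
  rcases h : value.toList.any (fun c => qvSpecial.contains c) with _ | _ <;>
    by_cases hs : value ≠ PySem.Str.strip value <;>
    simp [hs]
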